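-- pv_equiv track=rewrite | github.com/Liuyi61111/ImiPath | PFACO/expertACO.py | count_turns
-- ===== SOURCE A (Python) =====
-- def count_turns(path):
--     if len(path) < 3:
--         return 0  # 如果路径点少于3个，无法形成拐角，返回0
--     turns = 0
--     for i in range(1, len(path) - 1):
--         x1, y1 = path[i-1]
--         x2, y2 = path[i]
--         x3, y3 = path[i+1]
--         cross_product = (x2 - x1) * (y3 - y2) - (y2 - y1) * (x3 - x2)
--         if cross_product != 0:
--             turns += 1
--     return turns
-- ===== SOURCE B (Python) =====
-- def count_turns(path):
--     # Divide and conquer: split the path into two overlapping halves whose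
--     # interior triples partition the original interior triples.
--     if len(path) < 3:
--         return 0
--     if len(path) == 3:
--         (x1, y1), (x2, y2), (x3, y3) = path
--         return 1 if (x2 - x1) * (y3 - y2) - (y2 - y1) * (x3 - x2) != 0 else 0
--     m = len(path) // 2
--     return count_turns(path[:m + 1]) + count_turns(path[m - 1:])
-- ===== Notes on version B (the rewrite author's own statement) =====
-- stated objective: alternative
-- what changed: B replaces A's single indexed linear loop by a divide-and-conquer recursion: the path is split into two halves overlapping in two points (so the interior triples partition exactly), with a single-triple base case; no index loop remains.
import Mathlib
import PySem

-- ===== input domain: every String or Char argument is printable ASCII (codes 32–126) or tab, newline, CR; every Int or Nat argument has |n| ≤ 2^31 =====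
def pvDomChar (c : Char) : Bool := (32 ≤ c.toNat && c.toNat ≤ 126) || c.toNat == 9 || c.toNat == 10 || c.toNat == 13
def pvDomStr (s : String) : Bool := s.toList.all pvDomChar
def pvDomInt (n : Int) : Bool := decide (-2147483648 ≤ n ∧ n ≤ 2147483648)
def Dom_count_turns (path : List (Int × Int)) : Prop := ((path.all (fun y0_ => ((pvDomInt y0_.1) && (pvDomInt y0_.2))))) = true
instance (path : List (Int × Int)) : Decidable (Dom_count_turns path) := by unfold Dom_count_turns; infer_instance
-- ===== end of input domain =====

-- B replaces A's indexed linear loop with a divide-and-conquer recursion over two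
-- overlapping halves of the path (objective: alternative; not faster, same exact result).

-- ===== PORT A =====
def count_turns (path : List (Int × Int)) : Int :=
  if path.length < 3 then 0
  else
    (PySem.List.pyRange 1 ((path.length : Int) - 1) 1).foldl
      (fun turns i =>
        let p1 := PySem.List.pyGetD path (i - 1) (0, 0)
        let p2 := PySem.List.pyGetD path i (0, 0)
        let p3 := PySem.List.pyGetD path (i + 1) (0, 0)
        let cross := (p2.1 - p1.1) * (p3.2 - p2.2) - (p2.2 - p1.2) * (p3.1 - p2.1)
        if cross ≠ 0 then turns + 1 else turns) 0

-- ===== PORT B =====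
-- Python's path[:m+1] / path[m-1:] with 0 ≤ m-1 ≤ m+1 are exactly take (m+1) / drop (m-1).
def count_turns_alt (path : List (Int × Int)) : Int :=
  if path.length < 3 then 0
  else if path.length = 3 then
    match path with
    | (x1, y1) :: (x2, y2) :: (x3, y3) :: _ =>
        if (x2 - x1) * (y3 - y2) - (y2 - y1) * (x3 - x2) ≠ 0 then 1 else 0
    | _ => 0
  else
    let m := path.length / 2
    count_turns_alt (path.take (m + 1)) + count_turns_alt (path.drop (m - 1))
termination_by path.length
decreasing_by
  · simp only [List.length_take]; omega
  · simp only [List.length_drop]; omega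

-- ===== PRECONDITION & SPEC =====
def Spec_count_turns (path : List (Int × Int)) (out : Int) : Prop := out = count_turns_alt path
instance (path : List (Int × Int)) (out : Int) : Decidable (Spec_count_turns path out) := by unfold Spec_count_turns; infer_instance

-- ===== CLAIM (what is proved, stated in full; the proofs are below) =====
def Claim_equal_count_turns : Prop := ∀ (path : List (Int × Int)), Dom_count_turns path → Spec_count_turns path (count_turns path)

-- ===== LEMMAS AND PROOFS =====

-- The common mathematical description: number of interior indices with nonzero cross product.
def crossAt (p : List (Int × Int)) (k : Nat) : Int :=
  let a := p.getD k (0, 0)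
  let b := p.getD (k + 1) (0, 0)
  let c := p.getD (k + 2) (0, 0)
  (b.1 - a.1) * (c.2 - b.2) - (b.2 - a.2) * (c.1 - b.1)

def turnsSpec (p : List (Int × Int)) : Int :=
  (((List.range (p.length - 2)).countP (fun k => decide (crossAt p k ≠ 0)) : Nat) : Int)

theorem crossAt_take (p : List (Int × Int)) (t k : Nat) (h : k + 2 < t) :
    crossAt (p.take t) k = crossAt p k := by
  unfold crossAt
  simp only [List.getD_eq_getElem?_getD, List.getElem?_take]
  rw [if_pos (by omega), if_pos (by omega), if_pos (by omega)]

theorem crossAt_drop (p : List (Int × Int)) (t k : Nat) :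
    crossAt (p.drop t) k = crossAt p (t + k) := by
  unfold crossAt
  simp only [List.getD_eq_getElem?_getD, List.getElem?_drop]
  congr 2 <;> omega

theorem A_eq_spec (path : List (Int × Int)) : count_turns path = turnsSpec path := by
  by_cases h : path.length < 3
  · unfold count_turns turnsSpec
    rw [if_pos h]
    have : path.length - 2 = 0 := by omega
    simp [this]
  · unfold count_turns turnsSpec
    rw [if_neg h]
    rw [PySem.List.pyRange_one, List.foldl_map, PySem.List.foldl_ite_add_one]
    have hm : ((path.length : Int) - 1 - 1).toNat = path.length - 2 := by omega
    rw [hm, zero_add]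
    congr 1
    apply List.countP_congr
    intro k hkmem
    have hk : k < path.length - 2 := List.mem_range.mp hkmem
    have e1 : (1 : Int) + (k : Int) - 1 = ((k : Nat) : Int) := by omega
    have e3 : (1 : Int) + (k : Int) + 1 = (((k + 2 : Nat)) : Int) := by omega
    have e2 : (1 : Int) + (k : Int) = (((k + 1 : Nat)) : Int) := by omega
    rw [e1, e3, e2]
    simp only [PySem.List.pyGetD_natCast]
    simp [crossAt]

theorem spec_split (p : List (Int × Int)) (m : Nat) (h2 : 2 ≤ m) (hn : m ≤ p.length - 2) :
    turnsSpec p = turnsSpec (p.take (m + 1)) + turnsSpec (p.drop (m - 1)) := by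
  unfold turnsSpec
  have hlt : (p.take (m + 1)).length - 2 = m - 1 := by
    simp [List.length_take]; omega
  have hld : (p.drop (m - 1)).length - 2 = p.length - m - 1 := by
    simp [List.length_drop]; omega
  have hsum : p.length - 2 = (m - 1) + (p.length - m - 1) := by omega
  have hA : (List.range (m - 1)).countP (fun k => decide (crossAt p k ≠ 0))
      = (List.range (m - 1)).countP (fun k => decide (crossAt (p.take (m + 1)) k ≠ 0)) := by
    apply List.countP_congr
    intro k hk
    have hk' : k < m - 1 := List.mem_range.mp hk
    rw [crossAt_take p (m + 1) k (by omega)]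
  have hB : ((List.range (p.length - m - 1)).map (fun k => (m - 1) + k)).countP
        (fun k => decide (crossAt p k ≠ 0))
      = (List.range (p.length - m - 1)).countP (fun k => decide (crossAt (p.drop (m - 1)) k ≠ 0)) := by
    rw [List.countP_map]
    apply List.countP_congr
    intro k hk
    simp only [Function.comp_apply]
    rw [crossAt_drop]
  rw [hlt, hld, hsum, List.range_add, List.countP_append, hA, hB]
  push_cast
  ring

theorem B_eq_spec (path : List (Int × Int)) : count_turns_alt path = turnsSpec path := by
  induction path using count_turns_alt.induct with
  | case1 p h =>
    rw [count_turns_alt.eq_def, if_pos h]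
    unfold turnsSpec
    have : p.length - 2 = 0 := by omega
    simp [this]
  | case2 x1 y1 x2 y2 x3 y3 tail hc h h3 =>
    have ht : tail = [] := by
      simp only [List.length_cons] at h3
      exact List.eq_nil_of_length_eq_zero (by omega)
    subst ht
    rw [count_turns_alt.eq_def]
    simp [turnsSpec, crossAt, List.range_succ, hc]
  | case3 x1 y1 x2 y2 x3 y3 tail hc h h3 =>
    have ht : tail = [] := by
      simp only [List.length_cons] at h3
      exact List.eq_nil_of_length_eq_zero (by omega)
    subst ht
    rw [count_turns_alt.eq_def]
    simp [turnsSpec, crossAt, List.range_succ, hc]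
  | case4 p h h3 hfalse =>
    exfalso
    obtain ⟨⟨a1, a2⟩, ⟨b1, b2⟩, ⟨c1, c2⟩, rfl⟩ := List.length_eq_three.mp h3
    exact hfalse a1 a2 b1 b2 c1 c2 [] rfl
  | case5 p h h3 m ih1 ih2 =>
    rw [count_turns_alt.eq_def]
    rw [if_neg h, if_neg h3]
    simp only []
    rw [ih1, ih2]
    exact (spec_split p (p.length / 2) (by omega) (by omega)).symm

-- ===== VERDICT (by name: the statement is the Claim_ definition above) =====
theorem count_turns_spec : Claim_equal_count_turns := by
  intro path _
  show count_turns path = count_turns_alt path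
  rw [A_eq_spec, B_eq_spec]
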